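-- pv_equiv track=rewrite | github.com/ZSvedic/STIRR | src-cli-min-cursor/stirr-tree-cursor-iter1.py | build_tag_stats
-- ===== SOURCE A (Python) =====
-- from collections import Counter
--
-- def build_tag_stats(tags):
--     """Map lowercase tag key to counts, display form, and discovery order."""
--     counts = Counter()
--     display_names = {}
--     order = {}
--     for tag in tags:
--         key = tag.lower()
--         counts[key] += 1
--         if key not in display_names:
--             display_names[key] = tag
--             order[key] = len(order)
--     return counts, display_names, order
-- ===== SOURCE B (Python) =====
-- from collections import Counter
--
-- def build_tag_stats(tags):
--     """Map lowercase tag key to counts, display form, and discovery order."""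
--     keys = [t.lower() for t in tags]
--     counts = Counter(keys)
--     # first occurrence wins: iterating the reversed pairs, later (earlier-in-tags)
--     # writes overwrite earlier ones, so each key ends up with its FIRST tag form
--     first_form = dict(zip(reversed(keys), reversed(tags)))
--     uniq = list(dict.fromkeys(keys))          # distinct keys in first-seen order
--     display_names = {k: first_form[k] for k in uniq}
--     order = {k: i for i, k in enumerate(uniq)}
--     return counts, display_names, order
-- ===== Notes on version B (the rewrite author's own statement) =====
-- stated objective: alternative
-- what changed: B replaces A's single stateful loop (conditional first-seen updates of three maps at once) by branch-free bulk constructions: a Counter over the lowercased keys, a reversed-zip dict whose overwrite rule makes the first occurrence's display form win, an ordered dedup for discovery order, and two comprehensions assembling the result.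
import Mathlib
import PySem

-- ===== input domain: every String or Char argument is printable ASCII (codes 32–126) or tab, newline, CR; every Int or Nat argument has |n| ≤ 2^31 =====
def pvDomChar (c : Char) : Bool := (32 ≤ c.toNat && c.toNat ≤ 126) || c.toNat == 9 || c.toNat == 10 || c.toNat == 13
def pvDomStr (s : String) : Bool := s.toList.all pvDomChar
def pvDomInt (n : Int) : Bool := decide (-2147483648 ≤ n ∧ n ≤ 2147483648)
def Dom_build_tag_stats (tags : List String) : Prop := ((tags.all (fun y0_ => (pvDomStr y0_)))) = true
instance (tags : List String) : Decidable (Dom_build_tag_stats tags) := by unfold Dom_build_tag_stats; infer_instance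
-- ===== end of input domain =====

-- B replaces A's single stateful loop by branch-free bulk constructions (Counter, reversed-zip dict, ordered dedup, comprehensions).

-- ===== PORT A =====
-- A: one loop over tags maintaining (counts, display_names, order) together
def buildStepA (st : PySem.Dict String Int × PySem.Dict String String × PySem.Dict String Int)
    (tag : String) : PySem.Dict String Int × PySem.Dict String String × PySem.Dict String Int :=
  let key := PySem.Str.lower tag
  let counts := st.1.modify key 0 (· + 1)
  if st.2.1.contains key then (counts, st.2.1, st.2.2)
  else (counts, st.2.1.insert key tag, st.2.2.insert key (st.2.2.size : Int))

def build_tag_stats (tags : List String) : (List (String × Int)) × (List (String × String)) × (List (String × Int)) :=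
  let st := tags.foldl buildStepA (PySem.Dict.empty, PySem.Dict.empty, PySem.Dict.empty)
  (st.1.items, st.2.1.items, st.2.2.items)

-- ===== PORT B =====
def build_tag_stats_alt (tags : List String) : (List (String × Int)) × (List (String × String)) × (List (String × Int)) :=
  let keys := tags.map (fun t => PySem.Str.lower t)
  let counts := PySem.Dict.counter keys
  -- dict(zip(reversed(keys), reversed(tags))): overwriting makes the FIRST occurrence's form win
  let first_form := PySem.Dict.ofList (keys.reverse.zip tags.reverse)
  let uniq := PySem.List.dedup keys
  -- {k: first_form[k] for k in uniq}: every k ∈ uniq is a key of first_form, so first_form[k] never misses; getD "" is exact here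
  let display_names := uniq.foldl (fun d k => d.insert k (first_form.getD k "")) PySem.Dict.empty
  -- {k: i for i, k in enumerate(uniq)}
  let order := (PySem.List.enumerate uniq).foldl (fun d p => d.insert p.2 p.1) PySem.Dict.empty
  (counts.items, display_names.items, order.items)

-- ===== PRECONDITION & SPEC =====
def Spec_build_tag_stats (tags : List String) (out : (List (String × Int)) × (List (String × String)) × (List (String × Int))) : Prop := out = build_tag_stats_alt tags
instance (tags : List String) (out : (List (String × Int)) × (List (String × String)) × (List (String × Int))) : Decidable (Spec_build_tag_stats tags out) := by unfold Spec_build_tag_stats; infer_instance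

-- ===== CLAIM (what is proved, stated in full; the proofs are below) =====
def Claim_equal_build_tag_stats : Prop := ∀ (tags : List String), Dom_build_tag_stats tags → Spec_build_tag_stats tags (build_tag_stats tags)

-- ===== LEMMAS AND PROOFS =====

-- first tag of tags whose lowercase form is k (proof-side characterisation of A's display value)
def firstD (tags : List String) (k : String) : String :=
  (tags.find? (fun t => PySem.Str.lower t == k)).getD ""

-- B's pass 2/3 material, abbreviated for the proofs
def lkeys (tags : List String) : List String := tags.map (fun t => PySem.Str.lower t)

-- A's combined fold splits: counts evolve independently of the first-seen pair
theorem foldl_split (tags : List String) (c : PySem.Dict String Int)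
    (p : PySem.Dict String String × PySem.Dict String Int) :
    tags.foldl buildStepA (c, p) =
      ((lkeys tags).foldl (fun d x => d.modify x 0 (· + 1)) c,
       tags.foldl (fun st tag =>
         let key := PySem.Str.lower tag
         if st.1.contains key then st
         else (st.1.insert key tag, st.2.insert key (st.2.size : Int))) p) := by
  induction tags generalizing c p with
  | nil => rfl
  | cons t ts ih =>
    simp only [List.foldl_cons, lkeys, List.map_cons, buildStepA]
    by_cases h : p.1.contains (PySem.Str.lower t)
    · simp [h, ih, lkeys]
    · simp [h, ih, lkeys]

theorem enumerate_append_singleton {α : Type} (xs : List α) (x : α) (s : Int) :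
    PySem.List.enumerate (xs ++ [x]) s = PySem.List.enumerate xs s ++ [(s + xs.length, x)] := by
  induction xs generalizing s with
  | nil => simp [PySem.List.enumerate_cons]
  | cons y ys ih =>
    simp only [List.cons_append, PySem.List.enumerate_cons, ih, List.length_cons]
    congr 2
    push_cast; ring_nf

-- lookup in a dict built from (lower t, t) pairs = LAST matching element of the list
theorem getD_update_pairs (l : List String) (d : PySem.Dict String String) (k : String) :
    (d.update (l.map (fun t => (PySem.Str.lower t, t)))).getD k "" =
      match l.reverse.find? (fun t => PySem.Str.lower t == k) with
      | some t => t
      | none => d.getD k "" := by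
  induction l generalizing d with
  | nil => simp [PySem.Dict.update]
  | cons t ts ih =>
    have : (t :: ts).reverse.find? (fun t => PySem.Str.lower t == k)
        = (ts.reverse.find? (fun t => PySem.Str.lower t == k)).or
            (if PySem.Str.lower t == k then some t else none) := by
      simp [List.find?_append]
    rw [this]
    have hstep : (d.update ((t :: ts).map (fun t => (PySem.Str.lower t, t))))
        = ((d.insert (PySem.Str.lower t) t).update (ts.map (fun t => (PySem.Str.lower t, t)))) := by
      simp [PySem.Dict.update]
    rw [hstep, ih]
    cases hf : ts.reverse.find? (fun t => PySem.Str.lower t == k) with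
    | some u => simp
    | none =>
      by_cases hk : k = PySem.Str.lower t
      · simp [hk]
      · have : (PySem.Str.lower t == k) = false := by
          simp; exact fun h => hk h.symm
        simp [this, PySem.Dict.getD_insert, hk]

-- the reversed-zip dict of B looks up exactly the first occurrence's tag
theorem getD_first_form (tags : List String) (k : String) :
    (PySem.Dict.ofList ((lkeys tags).reverse.zip tags.reverse)).getD k "" = firstD tags k := by
  have hz : (lkeys tags).reverse.zip tags.reverse
      = tags.reverse.map (fun t => (PySem.Str.lower t, t)) := by
    have hz0 := List.zip_map' (f := fun t => PySem.Str.lower t) (g := id) (l := tags.reverse)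
    simp only [List.map_id] at hz0
    simp only [lkeys, ← List.map_reverse]
    exact hz0
  rw [PySem.Dict.ofList, hz, getD_update_pairs, List.reverse_reverse]
  unfold firstD
  cases hf : tags.find? (fun t => PySem.Str.lower t == k) <;> simp [PySem.Dict.getD_empty]

-- characterisation of A's first-seen loop: its two dicts are B's dedup/enumerate material
theorem stepB_fold (tags : List String) :
    tags.foldl (fun st tag =>
        let key := PySem.Str.lower tag
        if st.1.contains key then st
        else (st.1.insert key tag, st.2.insert key (st.2.size : Int)))
      ((PySem.Dict.empty : PySem.Dict String String), (PySem.Dict.empty : PySem.Dict String Int)) =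
      (⟨(PySem.Set.ofList (lkeys tags)).map (fun k => (k, firstD tags k))⟩,
       ⟨(PySem.List.enumerate (PySem.Set.ofList (lkeys tags))).map (fun p => (p.2, p.1))⟩) := by
  induction tags using List.reverseRecOn with
  | nil => rfl
  | append_singleton ts t ih =>
    rw [List.foldl_append, ih]
    have hkeys : lkeys (ts ++ [t]) = lkeys ts ++ [PySem.Str.lower t] := by simp [lkeys]
    have hset : PySem.Set.ofList (lkeys (ts ++ [t]))
        = (PySem.Set.ofList (lkeys ts)).add (PySem.Str.lower t) := by
      rw [hkeys, PySem.Set.ofList_append_singleton]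
    -- membership of the new key among the seen keys
    by_cases hmem : PySem.Str.lower t ∈ lkeys ts
    · -- key already seen: state unchanged, set unchanged, firstD unchanged on seen keys
      have hmem' : PySem.Str.lower t ∈ PySem.Set.ofList (lkeys ts) :=
        (PySem.Set.mem_ofList _ _).mpr hmem
      have hadd : (PySem.Set.ofList (lkeys ts)).add (PySem.Str.lower t)
          = PySem.Set.ofList (lkeys ts) := PySem.Set.add_of_mem hmem'
      have hcont : (PySem.Dict.mk ((PySem.Set.ofList (lkeys ts)).map
          (fun k => (k, firstD ts k)))).contains (PySem.Str.lower t) = true := by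
        rw [PySem.Dict.contains_mk, List.any_map]
        simp only [List.any_eq_true]
        exact ⟨_, hmem', by simp⟩
      have hfirst : ∀ k ∈ PySem.Set.ofList (lkeys ts), firstD (ts ++ [t]) k = firstD ts k := by
        intro k hk
        obtain ⟨u, hu, hlu⟩ := List.exists_of_mem_map ((PySem.Set.mem_ofList _ _).mp hk)
        unfold firstD
        rw [List.find?_append]
        cases hf : ts.find? (fun x => PySem.Str.lower x == k) with
        | some v => simp
        | none =>
          exfalso
          have := List.find?_eq_none.mp hf u hu
          simp [hlu] at this
      simp only [List.foldl_cons, List.foldl_nil, hcont, if_true, hset, hadd, Prod.mk.injEq]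
      refine ⟨?_, trivial⟩
      congr 1
      exact (List.map_congr_left (fun k hk => by rw [hfirst k hk])).symm
    · -- new key: both dicts append, the set appends, firstD extends
      have hmem' : PySem.Str.lower t ∉ PySem.Set.ofList (lkeys ts) := by
        rw [PySem.Set.mem_ofList]; exact hmem
      have hadd : (PySem.Set.ofList (lkeys ts)).add (PySem.Str.lower t)
          = PySem.Set.ofList (lkeys ts) ++ [PySem.Str.lower t] :=
        PySem.Set.add_of_not_mem hmem'
      have hcont : (PySem.Dict.mk ((PySem.Set.ofList (lkeys ts)).map
          (fun k => (k, firstD ts k)))).contains (PySem.Str.lower t) = false := by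
        rw [PySem.Dict.contains_mk, List.any_map]
        simp only [List.any_eq_false, Function.comp, beq_iff_eq]
        exact fun k hk h => hmem' (h ▸ hk)
      have hcont2 : (PySem.Dict.mk ((PySem.List.enumerate (PySem.Set.ofList (lkeys ts))).map
          (fun p => (p.2, p.1)))).contains (PySem.Str.lower t) = false := by
        rw [PySem.Dict.contains_mk, List.any_map]
        simp only [List.any_eq_false, Function.comp, beq_iff_eq]
        intro p hp h
        have : p.2 ∈ PySem.Set.ofList (lkeys ts) := by
          have := List.mem_map_of_mem (f := fun x => x.2) hp
          rwa [PySem.List.map_snd_enumerate] at this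
        exact hmem' (h ▸ this)
      have hfirst : ∀ k ∈ PySem.Set.ofList (lkeys ts), firstD (ts ++ [t]) k = firstD ts k := by
        intro k hk
        obtain ⟨u, hu, hlu⟩ := List.exists_of_mem_map ((PySem.Set.mem_ofList _ _).mp hk)
        unfold firstD
        rw [List.find?_append]
        cases hf : ts.find? (fun x => PySem.Str.lower x == k) with
        | some v => simp
        | none =>
          exfalso
          have := List.find?_eq_none.mp hf u hu
          simp [hlu] at this
      have hfirstt : firstD (ts ++ [t]) (PySem.Str.lower t) = t := by
        unfold firstD
        rw [List.find?_append]
        have hnone : ts.find? (fun x => PySem.Str.lower x == PySem.Str.lower t) = none := by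
          rw [List.find?_eq_none]
          intro u hu
          rw [Bool.not_eq_true, beq_eq_false_iff_ne]
          intro h
          exact hmem (h ▸ List.mem_map_of_mem (f := fun x => PySem.Str.lower x) hu)
        simp [hnone]
      simp only [List.foldl_cons, List.foldl_nil, hcont, Bool.false_eq_true, if_false, hset, hadd, Prod.mk.injEq]
      constructor
      · rw [PySem.Dict.ext_iff, PySem.Dict.items_insert_of_not_contains _ _ hcont]
        show List.map _ _ ++ _ = List.map _ _
        rw [List.map_append]
        congr 1
        · exact (List.map_congr_left (fun k hk => by rw [hfirst k hk])).symm
        · simp [hfirstt]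
      · rw [PySem.Dict.ext_iff, PySem.Dict.items_insert_of_not_contains _ _ hcont2]
        show List.map _ _ ++ _ = List.map _ _
        rw [enumerate_append_singleton, List.map_append]
        congr 1
        have hsize : (PySem.Dict.mk ((PySem.List.enumerate (PySem.Set.ofList (lkeys ts))).map
            (fun p => (p.2, p.1)))).size = (PySem.Set.ofList (lkeys ts)).length := by
          show (List.map _ _).length = _
          rw [List.length_map, PySem.List.length_enumerate]
        simp [hsize]

-- ===== VERDICT (by name: the statement is the Claim_ definition above) =====
theorem build_tag_stats_spec : Claim_equal_build_tag_stats := by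
  intro tags _
  show build_tag_stats tags = build_tag_stats_alt tags
  have huniq_nodup : (PySem.List.dedup (lkeys tags)).Nodup := by
    rw [PySem.List.dedup_eq_ofList]; exact PySem.Set.nodup_ofList _
  have hdisp : (PySem.List.dedup (lkeys tags)).foldl
      (fun d k => d.insert k ((PySem.Dict.ofList ((lkeys tags).reverse.zip tags.reverse)).getD k ""))
      PySem.Dict.empty
      = ⟨(PySem.Set.ofList (lkeys tags)).map (fun k => (k, firstD tags k))⟩ := by
    apply PySem.Dict.ext
    rw [PySem.Dict.items_foldl_insert_fresh (PySem.List.dedup (lkeys tags)) (fun k => k)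
        (fun k => (PySem.Dict.ofList ((lkeys tags).reverse.zip tags.reverse)).getD k "")
        PySem.Dict.empty
        (fun a _ => PySem.Dict.contains_empty a) (by rw [List.map_id_fun']; exact huniq_nodup)]
    show [] ++ _ = _
    rw [List.nil_append, PySem.List.dedup_eq_ofList]
    exact List.map_congr_left (fun k _ => by rw [getD_first_form])
  have horder : (PySem.List.enumerate (PySem.List.dedup (lkeys tags))).foldl
      (fun d p => d.insert p.2 p.1) PySem.Dict.empty
      = ⟨(PySem.List.enumerate (PySem.Set.ofList (lkeys tags))).map (fun p => (p.2, p.1))⟩ := by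
    apply PySem.Dict.ext
    rw [PySem.Dict.items_foldl_insert_fresh
        (PySem.List.enumerate (PySem.List.dedup (lkeys tags)))
        (fun p : Int × String => p.2) (fun p : Int × String => p.1) PySem.Dict.empty
        (fun a _ => PySem.Dict.contains_empty a.2)
        (by rw [PySem.List.map_snd_enumerate]; exact huniq_nodup)]
    show [] ++ _ = _
    rw [List.nil_append, PySem.List.dedup_eq_ofList]
  simp only [build_tag_stats, build_tag_stats_alt, foldl_split, stepB_fold,
    PySem.Dict.counter_eq_foldl]
  refine congrArg (fun x => (_, x)) ?_
  rw [show (tags.map (fun t => PySem.Str.lower t)) = lkeys tags from rfl, hdisp, horder]
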